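-- pv_equiv track=rewrite | github.com/Joona374/scoring-app-3 | backend/routes/excel/player_plus_minus/get_stats.py | convert_roster_to_lists_by_position
-- ===== SOURCE A (Python) =====
-- def convert_roster_to_lists_by_position(roster: dict) -> dict:
--     listed_roster = {"forwards": [], "defenders": []}
--
--     for player_dict in roster.values():
--         if player_dict["position"] == "FORWARD":
--             listed_roster["forwards"].append(player_dict)
--         elif player_dict["position"] == "DEFENDER":
--             listed_roster["defenders"].append(player_dict)
--
--     for group in listed_roster.values():
--         group.sort(key=lambda player: player["name"])
--
--     return listed_roster
-- ===== SOURCE B (Python) =====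
-- def _insert_sorted(group, player):
--     # insert player into name-sorted group, after any equal names (keeps arrival order)
--     i = 0
--     while i < len(group) and group[i]["name"] <= player["name"]:
--         i += 1
--     group.insert(i, player)
--
--
-- def convert_roster_to_lists_by_position(roster: dict) -> dict:
--     forwards = []
--     defenders = []
--     for player_dict in roster.values():
--         if player_dict["position"] == "FORWARD":
--             _insert_sorted(forwards, player_dict)
--         elif player_dict["position"] == "DEFENDER":
--             _insert_sorted(defenders, player_dict)
--     return {"forwards": forwards, "defenders": defenders}
-- ===== Notes on version B (the rewrite author's own statement) =====
-- stated objective: alternative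
-- what changed: B never calls sort: it maintains each group as an already name-sorted list, inserting every player at its sorted position (after equal names, so A's stable tie order is reproduced) in the single pass over roster.values(), whereas A first partitions and then batch-sorts each group with list.sort.
import Mathlib
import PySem

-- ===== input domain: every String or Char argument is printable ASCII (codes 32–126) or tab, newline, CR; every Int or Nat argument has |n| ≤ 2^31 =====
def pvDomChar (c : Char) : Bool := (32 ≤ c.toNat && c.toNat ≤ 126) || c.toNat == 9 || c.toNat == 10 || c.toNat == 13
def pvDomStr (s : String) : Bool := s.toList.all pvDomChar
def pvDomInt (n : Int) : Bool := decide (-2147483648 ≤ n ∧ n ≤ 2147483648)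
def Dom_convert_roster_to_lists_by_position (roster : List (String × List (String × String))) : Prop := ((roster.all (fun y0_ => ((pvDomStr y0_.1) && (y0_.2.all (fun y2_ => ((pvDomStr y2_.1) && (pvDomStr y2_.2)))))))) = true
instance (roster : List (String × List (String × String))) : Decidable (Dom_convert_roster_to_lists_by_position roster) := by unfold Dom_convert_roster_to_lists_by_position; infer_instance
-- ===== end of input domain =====

-- B replaces the batch sort of each group by incremental sorted insertion: each player is
-- inserted at its name-sorted position in its group during the single pass (alternative
-- decomposition; insertion sort, not asymptotically faster).

-- shared primitive: player_dict[k] as first-match association-list lookup (total via "" default;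
-- Pre_ guarantees the key is present wherever the Python subscripts)
def pvLookup (p : List (String × String)) (k : String) : String :=
  ((p.find? (fun kv => kv.1 == k)).map (·.2)).getD ""

-- ===== PORT A =====
def convert_roster_to_lists_by_position (roster : List (String × List (String × String))) : List (String × List (List (String × String))) :=
  let vals := roster.map (fun kv => kv.2)
  let groups := vals.foldl
    (fun (st : List (List (String × String)) × List (List (String × String))) player =>
      if pvLookup player "position" == "FORWARD" then (st.1 ++ [player], st.2)
      else if pvLookup player "position" == "DEFENDER" then (st.1, st.2 ++ [player])
      else st)
    ([], [])
  [("forwards", PySem.List.sorted groups.1 (fun pl => pvLookup pl "name")),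
   ("defenders", PySem.List.sorted groups.2 (fun pl => pvLookup pl "name"))]

-- ===== PORT B =====
-- _insert_sorted: walk past every element whose name is ≤ the new player's, insert there
def pvInsertSorted (group : List (List (String × String))) (player : List (String × String)) : List (List (String × String)) :=
  match group with
  | [] => [player]
  | y :: ys =>
    if pvLookup y "name" ≤ pvLookup player "name" then y :: pvInsertSorted ys player
    else player :: y :: ys

def convert_roster_to_lists_by_position_alt (roster : List (String × List (String × String))) : List (String × List (List (String × String))) :=
  let st := (roster.map (fun kv => kv.2)).foldl
    (fun (st : List (List (String × String)) × List (List (String × String))) player =>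
      if pvLookup player "position" == "FORWARD" then (pvInsertSorted st.1 player, st.2)
      else if pvLookup player "position" == "DEFENDER" then (st.1, pvInsertSorted st.2 player)
      else st)
    ([], [])
  [("forwards", st.1), ("defenders", st.2)]

-- ===== PRECONDITION & SPEC =====
-- Pre_ excludes exactly the rosters on which the Python raises KeyError: a player dict
-- without a "position" key, or a FORWARD/DEFENDER player dict without a "name" key.
def Pre_convert_roster_to_lists_by_position (roster : List (String × List (String × String))) : Prop :=
  ∀ kv ∈ roster, (kv.2.find? (fun e => e.1 == "position")).isSome ∧
    ((pvLookup kv.2 "position" = "FORWARD" ∨ pvLookup kv.2 "position" = "DEFENDER") →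
      (kv.2.find? (fun e => e.1 == "name")).isSome)
instance (roster : List (String × List (String × String))) : Decidable (Pre_convert_roster_to_lists_by_position roster) := by unfold Pre_convert_roster_to_lists_by_position; infer_instance
def pvWitness_convert_roster_to_lists_by_position : (List (String × List (String × String))) :=
  [("p1", [("position", "FORWARD"), ("name", "Zed")]),
   ("p2", [("position", "DEFENDER"), ("name", "Abe")]),
   ("p3", [("position", "FORWARD"), ("name", "Abe")])]
def Spec_convert_roster_to_lists_by_position (roster : List (String × List (String × String))) (out : List (String × List (List (String × String)))) : Prop := out = convert_roster_to_lists_by_position_alt roster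
instance (roster : List (String × List (String × String))) (out : List (String × List (List (String × String)))) : Decidable (Spec_convert_roster_to_lists_by_position roster out) := by unfold Spec_convert_roster_to_lists_by_position; infer_instance

-- ===== CLAIM (what is proved, stated in full; the proofs are below) =====
def Claim_equal_convert_roster_to_lists_by_position : Prop := ∀ (roster : List (String × List (String × String))), Dom_convert_roster_to_lists_by_position roster → Pre_convert_roster_to_lists_by_position roster → Spec_convert_roster_to_lists_by_position roster (convert_roster_to_lists_by_position roster)

-- ===== LEMMAS AND PROOFS =====

-- B's hand-written sorted insertion is PySem's insertBy on the name key
theorem pv_insertSorted_eq (g : List (List (String × String))) (p : List (String × String)) :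
    pvInsertSorted g p =
      PySem.List.insertBy (fun a b => decide (pvLookup a "name" < pvLookup b "name")) p g := by
  induction g with
  | nil => simp [pvInsertSorted, PySem.List.insertBy]
  | cons y ys ih =>
    by_cases h : pvLookup y "name" ≤ pvLookup p "name"
    · have h' : ¬ pvLookup p "name" < pvLookup y "name" := not_lt.mpr h
      simp [pvInsertSorted, PySem.List.insertBy, h, h', ih]
    · have h' : pvLookup p "name" < pvLookup y "name" := lt_of_not_ge h
      simp [pvInsertSorted, PySem.List.insertBy, h, h']

-- the accumulating pair loop of A is a pair of filters
theorem pv_fold_pair (vals : List (List (String × String)))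
    (f d : List (List (String × String))) :
    vals.foldl
      (fun (st : List (List (String × String)) × List (List (String × String))) player =>
        if pvLookup player "position" == "FORWARD" then (st.1 ++ [player], st.2)
        else if pvLookup player "position" == "DEFENDER" then (st.1, st.2 ++ [player])
        else st)
      (f, d) =
    (f ++ vals.filter (fun pl => pvLookup pl "position" == "FORWARD"),
     d ++ vals.filter (fun pl => pvLookup pl "position" == "DEFENDER")) := by
  induction vals generalizing f d with
  | nil => simp
  | cons v vs ih =>
    simp only [List.foldl_cons, List.filter_cons]
    by_cases hF : pvLookup v "position" == "FORWARD"
    · have hD : (pvLookup v "position" == "DEFENDER") = false := by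
        simp only [beq_iff_eq] at hF ⊢
        simp [hF]
      simp only [hF, if_true, ih, hD]
      simp
    · simp only [hF, Bool.false_eq_true, if_false]
      by_cases hD : pvLookup v "position" == "DEFENDER"
      · simp only [hD, if_true, ih]
        simp
      · simp only [hD, Bool.false_eq_true, if_false, ih]

-- B's dispatch-and-insert loop is a pair of insertion folds over the filters
theorem pv_fold_insert (vals : List (List (String × String)))
    (f d : List (List (String × String))) :
    vals.foldl
      (fun (st : List (List (String × String)) × List (List (String × String))) player =>
        if pvLookup player "position" == "FORWARD" then (pvInsertSorted st.1 player, st.2)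
        else if pvLookup player "position" == "DEFENDER" then (st.1, pvInsertSorted st.2 player)
        else st)
      (f, d) =
    ((vals.filter (fun pl => pvLookup pl "position" == "FORWARD")).foldl pvInsertSorted f,
     (vals.filter (fun pl => pvLookup pl "position" == "DEFENDER")).foldl pvInsertSorted d) := by
  induction vals generalizing f d with
  | nil => simp
  | cons v vs ih =>
    simp only [List.foldl_cons, List.filter_cons]
    by_cases hF : pvLookup v "position" == "FORWARD"
    · have hD : (pvLookup v "position" == "DEFENDER") = false := by
        simp only [beq_iff_eq] at hF ⊢
        simp [hF]
      simp only [hF, if_true, hD, Bool.false_eq_true, if_false, ih, List.foldl_cons]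
    · simp only [hF, Bool.false_eq_true, if_false]
      by_cases hD : pvLookup v "position" == "DEFENDER"
      · simp only [hD, if_true, ih, List.foldl_cons]
      · simp only [hD, Bool.false_eq_true, if_false, ih]

-- folding B's insertion from [] is PySem's sort
theorem pv_foldl_insertSorted_eq_sorted (l : List (List (String × String))) :
    l.foldl pvInsertSorted [] = PySem.List.sorted l (fun pl => pvLookup pl "name") := by
  rw [PySem.List.sorted_eq_foldl_insertBy]
  generalize ([] : List (List (String × String))) = acc
  induction l generalizing acc with
  | nil => rfl
  | cons x xs ih => simp only [List.foldl_cons, pv_insertSorted_eq, ih]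

-- ===== VERDICT (by name: the statement is the Claim_ definition above) =====
theorem convert_roster_to_lists_by_position_spec : Claim_equal_convert_roster_to_lists_by_position := by
  intro roster _ _
  unfold Spec_convert_roster_to_lists_by_position
  unfold convert_roster_to_lists_by_position convert_roster_to_lists_by_position_alt
  simp only [pv_fold_pair, pv_fold_insert, List.nil_append,
    pv_foldl_insertSorted_eq_sorted]
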